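-- pv_equiv track=rewrite | github.com/excentis/ByteBlower_python_examples | wireless_endpoint/ipv4_gaming_with_qed.py | get_bucket_index
-- ===== SOURCE A (Python) =====
-- class RangeType():
--     BELOW = 1
--     INSIDE = 2
--     ABOVE = 3
--
-- def get_bucket_index(percentage_below_range, cumulative_buckets, percent):
--     if percent <= percentage_below_range:
--         return {
--             'rangetype': RangeType.BELOW,  # The corresponding latency is below the specified latency range
--             'index': -1  # Dummy value
--         }
--     for idx, bucket in enumerate(cumulative_buckets):
--         if percent <= bucket:
--             return {
--                 'rangetype': RangeType.INSIDE,
--                 'index': idx + 1  # Add one because the percentile is reached at the end of the bucket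
--             }
--     return {
--         'rangetype': RangeType.ABOVE,  # The corresponding latency is above the specified latency range
--         'index': -1  # Dummy value
--     }
-- ===== SOURCE B (Python) =====
-- class RangeType():
--     BELOW = 1
--     INSIDE = 2
--     ABOVE = 3
--
--
-- def get_bucket_index(percentage_below_range, cumulative_buckets, percent):
--     # Binary search (bisect-left) for the first cumulative bucket boundary
--     # >= percent; cumulative buckets are nondecreasing by construction.
--     if percent <= percentage_below_range:
--         return {'rangetype': RangeType.BELOW, 'index': -1}
--     lo, hi = 0, len(cumulative_buckets)
--     while lo < hi:
--         mid = (lo + hi) // 2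
--         if cumulative_buckets[mid] < percent:
--             lo = mid + 1
--         else:
--             hi = mid
--     if lo == len(cumulative_buckets):
--         return {'rangetype': RangeType.ABOVE, 'index': -1}
--     return {'rangetype': RangeType.INSIDE, 'index': lo + 1}
-- ===== Notes on version B (the rewrite author's own statement) =====
-- stated objective: alternative
-- what changed: Replaces A's linear first-match scan over the buckets by a hand-written bisect-left binary search; Pre_ keeps the inputs where the two provably agree (percent in the BELOW branch, nondecreasing cumulative_buckets -- their natural shape as cumulative counts -- or percent beyond all buckets) and excludes unsorted lists with percent strictly between buckets, where binary search may pick a different bucket than the scan.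
-- outside the precondition, e.g. on get_bucket_index(0, [5, 1], 3): A returns {'rangetype': 2, 'index': 1}, B returns {'rangetype': 3, 'index': -1}
import Mathlib
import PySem

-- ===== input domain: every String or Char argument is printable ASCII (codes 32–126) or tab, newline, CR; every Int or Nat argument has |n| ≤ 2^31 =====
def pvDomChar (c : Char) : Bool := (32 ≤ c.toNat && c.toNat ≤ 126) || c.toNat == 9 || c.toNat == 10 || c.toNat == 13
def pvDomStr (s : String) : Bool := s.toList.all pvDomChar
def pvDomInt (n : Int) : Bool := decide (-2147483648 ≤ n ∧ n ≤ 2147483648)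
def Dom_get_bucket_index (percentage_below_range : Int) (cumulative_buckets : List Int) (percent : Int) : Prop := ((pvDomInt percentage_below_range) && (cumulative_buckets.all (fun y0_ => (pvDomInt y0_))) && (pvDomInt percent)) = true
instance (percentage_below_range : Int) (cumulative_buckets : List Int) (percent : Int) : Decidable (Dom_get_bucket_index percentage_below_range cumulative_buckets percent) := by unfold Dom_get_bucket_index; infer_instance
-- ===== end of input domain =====

-- B replaces A's linear first-match scan by a bisect-left binary search
-- (alternative algorithm), valid on the inputs admitted by Pre_.

-- ===== PORT A =====
-- the for-loop with early return: 'for idx, bucket in enumerate(...)' as a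
-- recursion carrying the running index
def pvAScan (percent : Int) (idx : Int) : List Int → List (String × Int)
  | [] => [("rangetype", 3), ("index", -1)]
  | bucket :: rest =>
    if percent ≤ bucket then [("rangetype", 2), ("index", idx + 1)]
    else pvAScan percent (idx + 1) rest

def get_bucket_index (percentage_below_range : Int) (cumulative_buckets : List Int) (percent : Int) : List (String × Int) :=
  if percent ≤ percentage_below_range then [("rangetype", 1), ("index", -1)]
  else pvAScan percent 0 cumulative_buckets

-- ===== PORT B =====
-- the while-loop of Source B; xs.getD mid 0 is exact because lo ≤ mid < hi ≤ len
def pvBisect (percent : Int) (xs : List Int) (lo hi : Nat) : Nat :=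
  if lo < hi then
    if xs.getD ((lo + hi) / 2) 0 < percent then pvBisect percent xs ((lo + hi) / 2 + 1) hi
    else pvBisect percent xs lo ((lo + hi) / 2)
  else lo
termination_by hi - lo
decreasing_by all_goals omega

def get_bucket_index_alt (percentage_below_range : Int) (cumulative_buckets : List Int) (percent : Int) : List (String × Int) :=
  if percent ≤ percentage_below_range then [("rangetype", 1), ("index", -1)]
  else
    let lo := pvBisect percent cumulative_buckets 0 cumulative_buckets.length
    if lo = cumulative_buckets.length then [("rangetype", 3), ("index", -1)]
    else [("rangetype", 2), ("index", (lo : Int) + 1)]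

-- ===== PRECONDITION & SPEC =====
-- Pre_ admits the inputs on which a binary search provably equals A's first-match
-- scan: the BELOW branch, nondecreasing cumulative_buckets (their natural shape, as
-- cumulative counts), or percent beyond all buckets on either side; it excludes
-- unsorted lists with percent strictly between buckets, where the two may disagree.
def Pre_get_bucket_index (percentage_below_range : Int) (cumulative_buckets : List Int) (percent : Int) : Prop :=
  percent ≤ percentage_below_range ∨ List.Pairwise (· ≤ ·) cumulative_buckets ∨
    (∀ b ∈ cumulative_buckets, b < percent) ∨ (∀ b ∈ cumulative_buckets, percent ≤ b)
instance (percentage_below_range : Int) (cumulative_buckets : List Int) (percent : Int) : Decidable (Pre_get_bucket_index percentage_below_range cumulative_buckets percent) := by unfold Pre_get_bucket_index; infer_instance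

def pvWitness_get_bucket_index : Int × List Int × Int := (0, [1, 2, 3], 2)

def Spec_get_bucket_index (percentage_below_range : Int) (cumulative_buckets : List Int) (percent : Int) (out : List (String × Int)) : Prop := out = get_bucket_index_alt percentage_below_range cumulative_buckets percent
instance (percentage_below_range : Int) (cumulative_buckets : List Int) (percent : Int) (out : List (String × Int)) : Decidable (Spec_get_bucket_index percentage_below_range cumulative_buckets percent out) := by unfold Spec_get_bucket_index; infer_instance

-- ===== CLAIM (what is proved, stated in full; the proofs are below) =====
def Claim_equal_get_bucket_index : Prop := ∀ (percentage_below_range : Int) (cumulative_buckets : List Int) (percent : Int), Dom_get_bucket_index percentage_below_range cumulative_buckets percent → Pre_get_bucket_index percentage_below_range cumulative_buckets percent → Spec_get_bucket_index percentage_below_range cumulative_buckets percent (get_bucket_index percentage_below_range cumulative_buckets percent)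

-- ===== LEMMAS AND PROOFS =====

-- the first index satisfying 'percent ≤ ·' (length if none)
def pvFirst (percent : Int) (xs : List Int) : Nat := xs.findIdx (fun b => decide (percent ≤ b))

theorem pvFirst_le_length (percent : Int) (xs : List Int) : pvFirst percent xs ≤ xs.length :=
  List.findIdx_le_length

theorem pvFirst_lt (percent : Int) (xs : List Int) (j : Nat) (hj : j < xs.length)
    (h : j < pvFirst percent xs) : xs.getD j 0 < percent := by
  have := List.not_of_lt_findIdx (p := fun b => decide (percent ≤ b)) (xs := xs) h
  simp only [decide_eq_false_iff_not, not_le] at this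
  rw [List.getD_eq_getElem _ _ hj]
  omega

theorem pvFirst_sat (percent : Int) (xs : List Int)
    (h : pvFirst percent xs < xs.length) : percent ≤ xs.getD (pvFirst percent xs) 0 := by
  have := List.findIdx_getElem (p := fun b => decide (percent ≤ b)) (xs := xs) (w := h)
  simp only [decide_eq_true_eq] at this
  rw [List.getD_eq_getElem _ _ h]
  exact this

theorem pvFirst_le_of_sat (percent : Int) (xs : List Int) (j : Nat) (hj : j < xs.length)
    (h : percent ≤ xs.getD j 0) : pvFirst percent xs ≤ j := by
  by_contra hlt
  have := pvFirst_lt percent xs j hj (by omega)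
  omega

-- nondecreasing list: getD is monotone
theorem pv_sorted_mono (xs : List Int) (hs : List.Pairwise (· ≤ ·) xs) (i j : Nat)
    (hij : i ≤ j) (hj : j < xs.length) : xs.getD i 0 ≤ xs.getD j 0 := by
  rw [List.getD_eq_getElem _ _ hj, List.getD_eq_getElem _ _ (by omega)]
  rcases Nat.eq_or_lt_of_le hij with rfl | hlt
  · exact le_refl _
  · exact (List.pairwise_iff_getElem.mp hs) i j (by omega) hj hlt

-- A's scan, characterised by pvFirst
theorem pvAScan_eq (percent : Int) (xs : List Int) : ∀ (idx : Int),
    pvAScan percent idx xs =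
      if pvFirst percent xs < xs.length then
        [("rangetype", 2), ("index", idx + (pvFirst percent xs : Int) + 1)]
      else [("rangetype", 3), ("index", -1)] := by
  induction xs with
  | nil => intro idx; simp [pvAScan, pvFirst]
  | cons b rest ih =>
    intro idx
    by_cases h : percent ≤ b
    · simp [pvAScan, pvFirst, List.findIdx_cons, h]
    · have hb : (decide (percent ≤ b)) = false := by simp [h]
      simp only [pvAScan, if_neg h, ih (idx + 1), pvFirst, List.findIdx_cons, hb,
        cond_false, List.length_cons]
      by_cases hlt : rest.findIdx (fun b => decide (percent ≤ b)) < rest.length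
      · rw [if_pos hlt, if_pos (by omega)]
        push_cast
        ring_nf
      · rw [if_neg hlt, if_neg (by omega)]

-- B's binary search returns pvFirst whenever every element below percent sits
-- strictly before the first match (invariant: lo ≤ first ≤ hi)
theorem pvBisect_eq (percent : Int) (xs : List Int)
    (H : ∀ j, j < xs.length → xs.getD j 0 < percent → j < pvFirst percent xs) :
    ∀ (lo hi : Nat), hi ≤ xs.length → lo ≤ pvFirst percent xs → pvFirst percent xs ≤ hi →
      pvBisect percent xs lo hi = pvFirst percent xs := by
  intro lo hi
  induction lo, hi using pvBisect.induct percent xs with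
  | case1 lo hi hlt hmid ih =>
    intro hhi hlo hfh
    rw [pvBisect, if_pos hlt, if_pos hmid]
    refine ih hhi ?_ hfh
    -- xs[mid] < percent ⇒ first > mid
    have := H ((lo + hi) / 2) (by omega) hmid
    omega
  | case2 lo hi hlt hmid ih =>
    intro hhi hlo hfh
    rw [pvBisect, if_pos hlt, if_neg hmid]
    refine ih (by omega) hlo ?_
    -- percent ≤ xs[mid] ⇒ first ≤ mid
    exact pvFirst_le_of_sat percent xs _ (by omega) (by omega)
  | case3 lo hi hlt =>
    intro hhi hlo hfh
    rw [pvBisect, if_neg hlt]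
    omega

-- ===== VERDICT (by name: the statement is the Claim_ definition above) =====
theorem get_bucket_index_spec : Claim_equal_get_bucket_index := by
  intro pbr xs percent _ hpre
  unfold Spec_get_bucket_index get_bucket_index get_bucket_index_alt
  by_cases h : percent ≤ pbr
  · simp [h]
  · have H : ∀ j, j < xs.length → xs.getD j 0 < percent → j < pvFirst percent xs := by
      intro j hj hlt
      have hmem : xs.getD j 0 ∈ xs := by
        rw [List.getD_eq_getElem _ _ hj]; exact List.getElem_mem hj
      rcases hpre with hb | hs | hall | hall
      · omega
      · by_contra hge
        have hfl : pvFirst percent xs < xs.length := by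
          have := pvFirst_le_length percent xs; omega
        have h1 := pvFirst_sat percent xs hfl
        have h2 := pv_sorted_mono xs hs (pvFirst percent xs) j (by omega) hj
        omega
      · by_contra hge
        have hfl : pvFirst percent xs < xs.length := by
          have := pvFirst_le_length percent xs; omega
        have h1 := pvFirst_sat percent xs hfl
        have hmem2 : xs.getD (pvFirst percent xs) 0 ∈ xs := by
          rw [List.getD_eq_getElem _ _ hfl]; exact List.getElem_mem hfl
        have := hall _ hmem2
        omega
      · have := hall _ hmem
        omega
    simp only [if_neg h]
    rw [pvAScan_eq percent xs 0,
      pvBisect_eq percent xs H 0 xs.length le_rfl (Nat.zero_le _) (pvFirst_le_length percent xs)]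
    have hle := pvFirst_le_length percent xs
    by_cases hlt : pvFirst percent xs < xs.length
    · rw [if_pos hlt, if_neg (by omega)]
      norm_num
    · rw [if_neg hlt, if_pos (by omega)]
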